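-- pv_equiv track=rewrite | github.com/nuebaek/algorithm | 프로그래머스/2/42626. 더 맵게/더 맵게.py | solution
-- ===== SOURCE A (Python) =====
-- import heapq
--
-- def solution(scoville, k):
--     answer = 0
--     heapq.heapify(scoville)
--     while len(scoville)>1 and scoville[0] < k:
--         scv1 = heapq.heappop(scoville)
--         scv2 = heapq.heappop(scoville)
--         heapq.heappush(scoville, scv1+(scv2*2))
--         answer += 1
--     if scoville[0] < k:
--         return -1
--     return answer
-- ===== SOURCE B (Python) =====
-- def _take(s, merged, i, j):
--     if i < len(s) and (j >= len(merged) or s[i] <= merged[j]):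
--         return s[i], i + 1, j
--     return merged[j], i, j + 1
--
-- def solution(scoville, k):
--     s = sorted(scoville)
--     merged = []
--     i = j = answer = 0
--     while (len(s) - i) + (len(merged) - j) > 1:
--         a, i, j = _take(s, merged, i, j)
--         if a >= k:
--             return answer
--         b, i, j = _take(s, merged, i, j)
--         merged.append(a + 2 * b)
--         answer += 1
--     last = s[i] if i < len(s) else merged[j]
--     return -1 if last < k else answer
-- ===== Notes on version B (the rewrite author's own statement) =====
-- stated objective: alternative
-- what changed: Replaces the running binary heap with the two-queue merge technique: sort once, then consume the sorted originals and a FIFO queue of merged values through two front pointers (taking the smaller front each time) and append a+2*b at the back of the FIFO; no heap and no re-insertion into any ordered structure, correctness resting on the proved invariant that the unconsumed FIFO part stays sorted.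
import Mathlib
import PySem

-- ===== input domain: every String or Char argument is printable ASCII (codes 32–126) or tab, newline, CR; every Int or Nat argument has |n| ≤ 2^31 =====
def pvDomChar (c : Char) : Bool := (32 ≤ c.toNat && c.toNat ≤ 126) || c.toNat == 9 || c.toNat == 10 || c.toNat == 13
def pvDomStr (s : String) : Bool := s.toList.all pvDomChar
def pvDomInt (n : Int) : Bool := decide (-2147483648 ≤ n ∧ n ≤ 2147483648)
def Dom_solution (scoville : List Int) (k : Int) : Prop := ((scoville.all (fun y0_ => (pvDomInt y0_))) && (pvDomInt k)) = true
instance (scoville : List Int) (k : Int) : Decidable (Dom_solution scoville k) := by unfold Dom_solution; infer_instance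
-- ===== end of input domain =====

-- B replaces the running heap with the classic two-queue merge: sort once, then consume the
-- sorted originals and a FIFO of merged values via two front pointers, appending a+2*b at the
-- back. Equivalence is about the RETURN value only — A heapifies scoville in place, B does not
-- mutate it.

-- ===== PORT A =====
-- heapq is ported as a verified min-heap (skew heap): push/peek/rest/heapify below are the
-- corresponding heap operations; the observable values (popped minima, scoville[0]) are
-- exactly Python heapq's. Nat fuel arguments only make the recursions structural (always
-- sufficient: merge needs size₁+size₂ steps, the loop at most size steps).
inductive PHeap
  | nil
  | node (v : Int) (l r : PHeap)
deriving DecidableEq, Repr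

def PHeap.size : PHeap → Nat
  | .nil => 0
  | .node _ l r => 1 + l.size + r.size

def PHeap.mergeF : Nat → PHeap → PHeap → PHeap
  | 0, _, t => t
  | _ + 1, .nil, t => t
  | _ + 1, t, .nil => t
  | fuel + 1, .node a l1 r1, .node b l2 r2 =>
    if a ≤ b then .node a (PHeap.mergeF fuel r1 (.node b l2 r2)) l1
    else .node b (PHeap.mergeF fuel r2 (.node a l1 r1)) l2

def PHeap.merge (t1 t2 : PHeap) : PHeap := PHeap.mergeF (t1.size + t2.size) t1 t2

-- heapq.heappush(heap, item)
def PHeap.push (t : PHeap) (x : Int) : PHeap := PHeap.merge t (.node x .nil .nil)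

-- heap[0] (default 0 is unreachable: only hit on the empty heap, excluded by Pre_)
def PHeap.peek : PHeap → Int
  | .nil => 0
  | .node v _ _ => v

-- the heap left after heapq.heappop
def PHeap.rest : PHeap → PHeap
  | .nil => .nil
  | .node _ l r => PHeap.merge l r

-- heapq.heapify(scoville)
def PHeap.heapify (xs : List Int) : PHeap := xs.foldl PHeap.push .nil

-- while len(scoville)>1 and scoville[0] < k: pop, pop, push scv1+(scv2*2); answer += 1
def loopAF : Nat → PHeap → Int → Int → Int
  | 0, t, k, answer => if t.peek < k then -1 else answer
  | fuel + 1, t, k, answer =>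
    if 1 < t.size ∧ t.peek < k then
      let scv1 := t.peek
      let t1 := t.rest
      let scv2 := t1.peek
      let t2 := t1.rest
      loopAF fuel (t2.push (scv1 + scv2 * 2)) k (answer + 1)
    else if t.peek < k then -1 else answer

def solution (scoville : List Int) (k : Int) : Int :=
  loopAF (PHeap.heapify scoville).size (PHeap.heapify scoville) k 0

-- ===== PORT B =====
-- _take(s, merged, i, j): return the smaller of the two queue fronts and advance its pointer
-- (the getD defaults 0 are unreachable: the guards and the loop's size condition keep the
-- accessed index in range on every reachable state; Python raises IndexError only on the
-- empty input, excluded by Pre_).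
def takeB (s merged : List Int) (i j : Nat) : Int × Nat × Nat :=
  if i < s.length ∧ (merged.length ≤ j ∨ s.getD i 0 ≤ merged.getD j 0) then
    (s.getD i 0, i + 1, j)
  else
    (merged.getD j 0, i, j + 1)

-- while (len(s)-i)+(len(merged)-j) > 1: a=_take(); if a>=k: return answer; b=_take();
-- merged.append(a+2*b); answer += 1 — then the post-loop check on the single remaining value.
-- (fuel = len(scoville)+1 always suffices: each iteration shrinks the remaining count by 1)
def loopBF : Nat → List Int → List Int → Nat → Nat → Int → Int → Int
  | 0, _, _, _, _, _, _ => -1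
  | fuel + 1, s, merged, i, j, k, answer =>
    if 1 < (s.length - i) + (merged.length - j) then
      let r1 := takeB s merged i j
      if r1.1 ≥ k then answer
      else
        let r2 := takeB s merged r1.2.1 r1.2.2
        loopBF fuel s (merged ++ [r1.1 + 2 * r2.1]) r2.2.1 r2.2.2 k (answer + 1)
    else
      let last := if i < s.length then s.getD i 0 else merged.getD j 0
      if last < k then -1 else answer

def solution_alt (scoville : List Int) (k : Int) : Int :=
  loopBF (scoville.length + 1) (PySem.List.sorted scoville (fun x => x) false) [] 0 0 k 0

-- ===== PRECONDITION & SPEC =====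
-- Pre_ excludes only the empty list, on which both Pythons raise IndexError.
def Pre_solution (scoville : List Int) (k : Int) : Prop := scoville ≠ []
instance (scoville : List Int) (k : Int) : Decidable (Pre_solution scoville k) := by unfold Pre_solution; infer_instance
def pvWitness_solution : List Int × Int := ([1, 2, 3, 9, 10, 12], 7)

def Spec_solution (scoville : List Int) (k : Int) (out : Int) : Prop := out = solution_alt scoville k
instance (scoville : List Int) (k : Int) (out : Int) : Decidable (Spec_solution scoville k out) := by unfold Spec_solution; infer_instance

-- ===== CLAIM (what is proved, stated in full; the proofs are below) =====
def Claim_equal_solution : Prop := ∀ (scoville : List Int) (k : Int), Dom_solution scoville k → Pre_solution scoville k → Spec_solution scoville k (solution scoville k)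

-- ===== LEMMAS AND PROOFS =====

def PHeap.toList : PHeap → List Int
  | .nil => []
  | .node v l r => v :: (l.toList ++ r.toList)

def IsHeap : PHeap → Prop
  | .nil => True
  | .node v l r => (∀ x ∈ l.toList, v ≤ x) ∧ (∀ x ∈ r.toList, v ≤ x) ∧ IsHeap l ∧ IsHeap r

theorem size_eq_zero {t : PHeap} (h : t.size = 0) : t = .nil := by
  cases t with
  | nil => rfl
  | node v l r => simp [PHeap.size] at h

theorem toList_mergeF (fuel : Nat) : ∀ (a b : PHeap), a.size + b.size ≤ fuel →
    (PHeap.mergeF fuel a b).toList.Perm (a.toList ++ b.toList) := by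
  induction fuel with
  | zero =>
    intro a b h
    have ha : a = .nil := size_eq_zero (by omega)
    subst ha
    simp [PHeap.mergeF, PHeap.toList]
  | succ fuel ih =>
    intro a b h
    cases a with
    | nil => simp [PHeap.mergeF, PHeap.toList]
    | node av l1 r1 =>
      cases b with
      | nil => simp [PHeap.mergeF, PHeap.toList]
      | node bv l2 r2 =>
        rw [PHeap.mergeF]
        split
        · simp only [PHeap.toList]
          have hfuel : r1.size + (PHeap.node bv l2 r2).size ≤ fuel := by
            simp only [PHeap.size] at h ⊢; omega
          refine List.Perm.cons _ (((ih _ _ hfuel).append_right _).trans ?_)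
          have hc := List.perm_append_comm
            (l₁ := r1.toList ++ (PHeap.node bv l2 r2).toList) (l₂ := l1.toList)
          simpa [PHeap.toList, List.append_assoc] using hc
        · simp only [PHeap.toList]
          have hfuel : r2.size + (PHeap.node av l1 r1).size ≤ fuel := by
            simp only [PHeap.size] at h ⊢; omega
          have hx : ((r2.toList ++ (PHeap.node av l1 r1).toList) ++ l2.toList).Perm
              ((PHeap.node av l1 r1).toList ++ (l2.toList ++ r2.toList)) := by
            refine (List.perm_append_comm).trans ?_
            rw [← List.append_assoc]
            exact List.perm_append_comm
          exact (List.Perm.cons _ (((ih _ _ hfuel).append_right _).trans hx)).trans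
            (List.perm_middle (a := bv) (l₁ := (PHeap.node av l1 r1).toList)
              (l₂ := l2.toList ++ r2.toList)).symm

theorem toList_merge (a b : PHeap) : (PHeap.merge a b).toList.Perm (a.toList ++ b.toList) :=
  toList_mergeF _ a b (le_refl _)

theorem isHeap_mergeF (fuel : Nat) : ∀ {a b : PHeap}, a.size + b.size ≤ fuel →
    IsHeap a → IsHeap b → IsHeap (PHeap.mergeF fuel a b) := by
  induction fuel with
  | zero =>
    intro a b h ha hb
    have hanil : a = .nil := size_eq_zero (by omega)
    subst hanil
    simpa [PHeap.mergeF] using hb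
  | succ fuel ih =>
    intro a b h ha hb
    cases a with
    | nil => simpa [PHeap.mergeF] using hb
    | node av l1 r1 =>
      cases b with
      | nil => simpa [PHeap.mergeF] using ha
      | node bv l2 r2 =>
        rw [PHeap.mergeF]
        obtain ⟨hal, har, hhl, hhr⟩ := ha
        obtain ⟨hbl, hbr, hhl2, hhr2⟩ := hb
        split
        · rename_i hab
          have hfuel : r1.size + (PHeap.node bv l2 r2).size ≤ fuel := by
            simp only [PHeap.size] at h ⊢; omega
          refine ⟨?_, hal, ih hfuel hhr ⟨hbl, hbr, hhl2, hhr2⟩, hhl⟩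
          intro x hx
          have hx' := (toList_mergeF fuel _ _ hfuel).subset hx
          rcases List.mem_append.mp hx' with h1 | h1
          · exact har x h1
          · simp only [PHeap.toList, List.mem_cons, List.mem_append] at h1
            rcases h1 with rfl | h1 | h1
            · exact hab
            · exact le_trans hab (hbl x h1)
            · exact le_trans hab (hbr x h1)
        · rename_i hab
          have hba : bv ≤ av := by omega
          have hfuel : r2.size + (PHeap.node av l1 r1).size ≤ fuel := by
            simp only [PHeap.size] at h ⊢; omega
          refine ⟨?_, hbl, ih hfuel hhr2 ⟨hal, har, hhl, hhr⟩, hhl2⟩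
          intro x hx
          have hx' := (toList_mergeF fuel _ _ hfuel).subset hx
          rcases List.mem_append.mp hx' with h1 | h1
          · exact hbr x h1
          · simp only [PHeap.toList, List.mem_cons, List.mem_append] at h1
            rcases h1 with rfl | h1 | h1
            · exact hba
            · exact le_trans hba (hal x h1)
            · exact le_trans hba (har x h1)

theorem isHeap_merge {a b : PHeap} (ha : IsHeap a) (hb : IsHeap b) : IsHeap (PHeap.merge a b) :=
  isHeap_mergeF _ (le_refl _) ha hb

theorem peek_le {t : PHeap} (ht : IsHeap t) : ∀ x ∈ t.toList, t.peek ≤ x := by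
  cases t with
  | nil => intro x hx; simp [PHeap.toList] at hx
  | node v l r =>
    intro x hx
    simp only [PHeap.toList, List.mem_cons, List.mem_append] at hx
    rcases hx with rfl | hx | hx
    · exact le_refl _
    · exact ht.1 x hx
    · exact ht.2.1 x hx

theorem size_eq_length (t : PHeap) : t.size = t.toList.length := by
  induction t <;> simp_all [PHeap.size, PHeap.toList] <;> omega

theorem toList_push (t : PHeap) (x : Int) : (t.push x).toList.Perm (x :: t.toList) := by
  refine (toList_merge t (.node x .nil .nil)).trans ?_
  simp only [PHeap.toList, List.append_nil]
  exact List.perm_append_comm.trans (by simp)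

theorem isHeap_push {t : PHeap} (ht : IsHeap t) (x : Int) : IsHeap (t.push x) :=
  isHeap_merge ht (by simp [IsHeap, PHeap.toList])

theorem heapify_perm (xs : List Int) : ∀ acc : PHeap,
    (xs.foldl PHeap.push acc).toList.Perm (acc.toList ++ xs) := by
  induction xs with
  | nil => intro acc; simp
  | cons x xs ih =>
    intro acc
    refine (ih (acc.push x)).trans ?_
    have h1 : ((acc.push x).toList ++ xs).Perm ((x :: acc.toList) ++ xs) :=
      (toList_push acc x).append_right xs
    refine h1.trans ?_
    simpa using (List.perm_middle (a := x) (l₁ := acc.toList) (l₂ := xs)).symm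

theorem heapify_isHeap (xs : List Int) : ∀ acc : PHeap, IsHeap acc →
    IsHeap (xs.foldl PHeap.push acc) := by
  induction xs with
  | nil => intro acc h; exact h
  | cons x xs ih => intro acc h; exact ih _ (isHeap_push h x)

-- the root of a nonempty heap is a member of its element list
theorem peek_mem {t : PHeap} (h : t ≠ .nil) : t.peek ∈ t.toList := by
  cases t with
  | nil => exact absurd rfl h
  | node v l r => simp [PHeap.peek, PHeap.toList]

-- a heap's root is the value any min-characterisation pins down
theorem peek_eq_of_min {t : PHeap} (ht : IsHeap t) (hne : t ≠ .nil) {v : Int} {rest : List Int}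
    (hperm : t.toList.Perm (v :: rest)) (hmin : ∀ x ∈ rest, v ≤ x) : t.peek = v := by
  have h1 : t.peek ≤ v := peek_le ht v (hperm.symm.subset (List.mem_cons_self))
  have h2 : t.peek ∈ v :: rest := hperm.subset (peek_mem hne)
  rcases List.mem_cons.mp h2 with h | h
  · exact h
  · exact le_antisymm h1 (hmin _ h)

-- what one _take does: it removes the minimum of the remaining multiset and bounds the rest
theorem take_spec (s merged : List Int) (i j : Nat)
    (hi : i ≤ s.length) (hj : j ≤ merged.length)
    (htot : 1 ≤ (s.length - i) + (merged.length - j))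
    (hs : s.Pairwise (· ≤ ·))
    (hm : (merged.drop j).Pairwise (· ≤ ·))
    (h4 : ∀ y ∈ merged.drop j, ∀ x ∈ s.drop i, y ≤ 3 * x)
    (h5 : (merged.drop j).Pairwise (fun u v => u ≤ 3 * v ∧ v ≤ 3 * u)) :
    (s.drop i ++ merged.drop j).Perm
      ((takeB s merged i j).1 :: (s.drop (takeB s merged i j).2.1 ++ merged.drop (takeB s merged i j).2.2))
    ∧ (∀ x ∈ s.drop (takeB s merged i j).2.1 ++ merged.drop (takeB s merged i j).2.2,
        (takeB s merged i j).1 ≤ x)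
    ∧ i ≤ (takeB s merged i j).2.1 ∧ j ≤ (takeB s merged i j).2.2
    ∧ (takeB s merged i j).2.1 ≤ s.length ∧ (takeB s merged i j).2.2 ≤ merged.length
    ∧ (takeB s merged i j).2.1 + (takeB s merged i j).2.2 = i + j + 1
    ∧ (∀ y ∈ merged.drop (takeB s merged i j).2.2, y ≤ 3 * (takeB s merged i j).1) := by
  unfold takeB
  split
  · rename_i hc
    obtain ⟨hilt, hc2⟩ := hc
    simp only
    have hdrop : s.drop i = s[i] :: s.drop (i + 1) := List.drop_eq_getElem_cons hilt
    have hgd : s.getD i 0 = s[i] := List.getD_eq_getElem s 0 hilt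
    have hhead : ∀ x ∈ s.drop (i + 1), s[i] ≤ x := by
      have := (hs.sublist (List.drop_sublist i s))
      rw [hdrop] at this
      exact (List.pairwise_cons.mp this).1
    have hmg : ∀ x ∈ merged.drop j, s.getD i 0 ≤ x := by
      intro x hx
      rcases hc2 with hjl | hle
      · rw [List.drop_eq_nil_of_le hjl] at hx; simp at hx
      · have hjlt : j < merged.length := by
          by_contra hnot
          rw [List.drop_eq_nil_of_le (by omega)] at hx; simp at hx
        have hmd : merged.drop j = merged[j] :: merged.drop (j + 1) :=
          List.drop_eq_getElem_cons hjlt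
        have hgdm : merged.getD j 0 = merged[j] := List.getD_eq_getElem merged 0 hjlt
        rw [hmd] at hx
        rcases List.mem_cons.mp hx with rfl | hx
        · rw [hgdm] at hle; exact hle
        · have := (List.pairwise_cons.mp (by rw [hmd] at hm; exact hm)).1 x hx
          rw [hgdm] at hle; omega
    refine ⟨?_, ?_, by omega, le_refl _, by omega, hj, by omega, ?_⟩
    · rw [hdrop, hgd, List.cons_append]
    · intro x hx
      rcases List.mem_append.mp hx with hx | hx
      · rw [hgd]; exact hhead x hx
      · exact hmg x hx
    · intro y hy
      exact h4 y hy (s.getD i 0) (by rw [hdrop, hgd]; exact List.mem_cons_self)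
  · rename_i hc
    simp only
    have hjlt : j < merged.length := by
      by_cases hil : i < s.length
      · push_neg at hc
        exact (hc hil).1
      · omega
    have hmd : merged.drop j = merged[j] :: merged.drop (j + 1) := List.drop_eq_getElem_cons hjlt
    have hgdm : merged.getD j 0 = merged[j] := List.getD_eq_getElem merged 0 hjlt
    have hsb : ∀ x ∈ s.drop i, merged.getD j 0 ≤ x := by
      intro x hx
      by_cases hil : i < s.length
      · push_neg at hc
        have hlt := (hc hil).2
        have hgd : s.getD i 0 = s[i] := List.getD_eq_getElem s 0 hil
        rw [hgd] at hlt
        have hdrop : s.drop i = s[i] :: s.drop (i + 1) := List.drop_eq_getElem_cons hil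
        rw [hdrop] at hx
        rcases List.mem_cons.mp hx with rfl | hx
        · omega
        · have hx2 : s[i] ≤ x := (List.pairwise_cons.mp (by
            have := (hs.sublist (List.drop_sublist i s)); rw [hdrop] at this; exact this)).1 x hx
          omega
      · rw [List.drop_eq_nil_of_le (by omega)] at hx; simp at hx
    have hmtail : ∀ x ∈ merged.drop (j + 1), merged.getD j 0 ≤ x := by
      rw [hgdm]
      exact (List.pairwise_cons.mp (by rw [hmd] at hm; exact hm)).1
    refine ⟨?_, ?_, le_refl _, by omega, hi, by omega, by omega, ?_⟩
    · rw [hmd, hgdm]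
      exact List.perm_middle (a := merged[j]) (l₁ := s.drop i) (l₂ := merged.drop (j + 1))
    · intro x hx
      rcases List.mem_append.mp hx with hx | hx
      · exact hsb x hx
      · exact hmtail x hx
    · intro y hy
      rw [hgdm]
      have h5' := h5
      rw [hmd] at h5'
      exact ((List.pairwise_cons.mp h5').1 y hy).2

-- drop a suffix: transfer of the invariants to a later pointer
theorem drop_le_drop {α : Type} (l : List α) {a b : Nat} (h : a ≤ b) :
    List.Sublist (l.drop b) (l.drop a) := by
  have : l.drop b = (l.drop a).drop (b - a) := by
    rw [List.drop_drop]
    congr 1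
    omega
  rw [this]
  exact List.drop_sublist _ _

-- the main loop invariant: heap contents ↔ the two queues' unconsumed parts
theorem loop_eq (fa : Nat) : ∀ (fb : Nat) (t : PHeap) (s merged : List Int) (i j : Nat) (k a : Int),
    t.size ≤ fa →
    (s.length - i) + (merged.length - j) ≤ fb →
    i ≤ s.length → j ≤ merged.length →
    t ≠ .nil → IsHeap t →
    t.toList.Perm (s.drop i ++ merged.drop j) →
    s.Pairwise (· ≤ ·) →
    (merged.drop j).Pairwise (· ≤ ·) →
    (∀ y ∈ merged.drop j, ∀ x ∈ s.drop i, y ≤ 3 * x) →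
    (merged.drop j).Pairwise (fun u v => u ≤ 3 * v ∧ v ≤ 3 * u) →
    loopAF fa t k a = loopBF fb s merged i j k a := by
  induction fa with
  | zero =>
    intro fb t s merged i j k a hsa _ _ _ hne _ _ _ _ _ _
    exact absurd (size_eq_zero (by omega)) hne
  | succ fa ih =>
    intro fb t s merged i j k a hsa hsb hi hj hne hheap hperm hs hm h4 h5
    have hsz : t.size = (s.length - i) + (merged.length - j) := by
      rw [size_eq_length, hperm.length_eq, List.length_append, List.length_drop, List.length_drop]
    have hpos : 1 ≤ t.size := by
      cases t with
      | nil => exact absurd rfl hne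
      | node v l r => simp [PHeap.size]; omega
    cases fb with
    | zero => omega
    | succ fb =>
      have htot : 1 ≤ (s.length - i) + (merged.length - j) := by omega
      obtain ⟨t1perm, t1min, hii1, hjj1, hi1, hj1, hsum1, h3a⟩ :=
        take_spec s merged i j hi hj htot hs hm h4 h5
      set r1 := takeB s merged i j with hr1
      -- the first taken value is the heap's root
      have hpeek : t.peek = r1.1 := peek_eq_of_min hheap hne (hperm.trans t1perm) t1min
      by_cases hbig : 1 < (s.length - i) + (merged.length - j)
      · by_cases hak : r1.1 ≥ k
        · -- loop stops in both: A's guard peek < k fails, B returns answer after the take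
          rw [loopAF, loopBF]
          have hcA : ¬ (1 < t.size ∧ t.peek < k) := by
            rintro ⟨-, hlt⟩
            rw [hpeek] at hlt
            omega
          rw [if_neg hcA, if_neg (by rw [hpeek]; omega), if_pos hbig]
          simp only [← hr1, if_pos hak]
        · -- merge step in both
          push_neg at hak
          have hcA : 1 < t.size ∧ t.peek < k := by
            constructor
            · omega
            · rw [hpeek]; exact hak
          -- invariants at the intermediate state (after the first take)
          have hmsub : List.Sublist (merged.drop r1.2.2) (merged.drop j) := drop_le_drop merged hjj1
          have hssub : List.Sublist (s.drop r1.2.1) (s.drop i) := drop_le_drop s hii1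
          have hm1 : (merged.drop r1.2.2).Pairwise (· ≤ ·) := hm.sublist hmsub
          have h41 : ∀ y ∈ merged.drop r1.2.2, ∀ x ∈ s.drop r1.2.1, y ≤ 3 * x :=
            fun y hy x hx => h4 y (hmsub.subset hy) x (hssub.subset hx)
          have h51 : (merged.drop r1.2.2).Pairwise (fun u v => u ≤ 3 * v ∧ v ≤ 3 * u) :=
            h5.sublist hmsub
          have htot1 : 1 ≤ (s.length - r1.2.1) + (merged.length - r1.2.2) := by omega
          obtain ⟨t2perm, t2min, hii2, hjj2, hi2, hj2, hsum2, h3b⟩ :=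
            take_spec s merged r1.2.1 r1.2.2 hi1 hj1 htot1 hs hm1 h41 h51
          set r2 := takeB s merged r1.2.1 r1.2.2 with hr2
          -- the heap after the first pop
          have hrestperm : t.rest.toList.Perm (s.drop r1.2.1 ++ merged.drop r1.2.2) := by
            cases t with
            | nil => exact absurd rfl hne
            | node v l r =>
              have hp : (v :: (l.toList ++ r.toList)).Perm
                  (r1.1 :: (s.drop r1.2.1 ++ merged.drop r1.2.2)) :=
                (hperm.trans t1perm)
              have hv : v = r1.1 := by simpa [PHeap.peek] using hpeek
              rw [hv] at hp
              exact (toList_merge l r).trans hp.cons_inv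
          have hrestheap : IsHeap t.rest := by
            cases t with
            | nil => simp [PHeap.rest, IsHeap]
            | node v l r => exact isHeap_merge hheap.2.2.1 hheap.2.2.2
          have hrestne : t.rest ≠ .nil := by
            intro hnil
            have := hrestperm.length_eq
            rw [hnil] at this
            simp only [PHeap.toList, List.length_nil, List.length_append, List.length_drop] at this
            omega
          have hpeek2 : t.rest.peek = r2.1 :=
            peek_eq_of_min hrestheap hrestne (hrestperm.trans t2perm) t2min
          -- the heap after the second pop
          have hrest2perm : t.rest.rest.toList.Perm (s.drop r2.2.1 ++ merged.drop r2.2.2) := by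
            cases hcase : t.rest with
            | nil => exact absurd hcase hrestne
            | node w l2 r2' =>
              have hp := hrestperm.trans t2perm
              rw [hcase] at hp
              have hw : w = r2.1 := by rw [hcase] at hpeek2; simpa [PHeap.peek] using hpeek2
              rw [hw] at hp
              simp only [PHeap.toList] at hp
              exact (toList_merge l2 r2').trans hp.cons_inv
          have hrest2heap : IsHeap t.rest.rest := by
            cases hcase : t.rest with
            | nil => simp [PHeap.rest, IsHeap]
            | node w l2 r2' =>
              have := hrestheap
              rw [hcase] at this
              exact isHeap_merge this.2.2.1 this.2.2.2
          -- facts about a, b and the surviving merged values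
          have hab : r1.1 ≤ r2.1 := t1min r2.1 (t2perm.symm.subset List.mem_cons_self)
          have hbmin : ∀ x ∈ s.drop r2.2.1 ++ merged.drop r2.2.2, r2.1 ≤ x := t2min
          have hmsub2 : List.Sublist (merged.drop r2.2.2) (merged.drop r1.2.2) := drop_le_drop merged hjj2
          have hy3a : ∀ y ∈ merged.drop r2.2.2, y ≤ 3 * r1.1 :=
            fun y hy => h3a y (hmsub2.subset hy)
          have hbnn : ∀ y ∈ merged.drop r2.2.2, 0 ≤ r2.1 := by
            intro y hy
            have h1 := hy3a y hy
            have h2 := hbmin y (List.mem_append.mpr (Or.inr hy))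
            omega
          -- the new merged queue
          have hj2len : r2.2.2 ≤ merged.length := hj2
          have hdropapp : (merged ++ [r1.1 + 2 * r2.1]).drop r2.2.2
              = merged.drop r2.2.2 ++ [r1.1 + 2 * r2.1] :=
            List.drop_append_of_le_length hj2len
          have hm' : ((merged ++ [r1.1 + 2 * r2.1]).drop r2.2.2).Pairwise (· ≤ ·) := by
            rw [hdropapp]
            rw [List.pairwise_append]
            refine ⟨hm1.sublist hmsub2, List.pairwise_singleton _ _, ?_⟩
            intro y hy z hz
            rw [List.mem_singleton] at hz
            subst hz
            have := hy3a y hy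
            omega
          have h4' : ∀ y ∈ (merged ++ [r1.1 + 2 * r2.1]).drop r2.2.2,
              ∀ x ∈ s.drop r2.2.1, y ≤ 3 * x := by
            rw [hdropapp]
            intro y hy x hx
            rcases List.mem_append.mp hy with hy | hy
            · exact h41 y (hmsub2.subset hy) x ((drop_le_drop s hii2).subset hx)
            · rw [List.mem_singleton] at hy
              subst hy
              have := hbmin x (List.mem_append.mpr (Or.inl hx))
              omega
          have h5' : ((merged ++ [r1.1 + 2 * r2.1]).drop r2.2.2).Pairwise
              (fun u v => u ≤ 3 * v ∧ v ≤ 3 * u) := by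
            rw [hdropapp]
            rw [List.pairwise_append]
            refine ⟨h51.sublist hmsub2, List.pairwise_singleton _ _, ?_⟩
            intro y hy z hz
            rw [List.mem_singleton] at hz
            subst hz
            have h1 := hy3a y hy
            have h2 := hbmin y (List.mem_append.mpr (Or.inr hy))
            have h3 := hbnn y hy
            constructor <;> omega
          -- the new heap contents
          have hpushperm : (t.rest.rest.push (t.peek + t.rest.peek * 2)).toList.Perm
              (s.drop r2.2.1 ++ (merged ++ [r1.1 + 2 * r2.1]).drop r2.2.2) := by
            rw [hdropapp, hpeek, hpeek2]
            refine (toList_push _ _).trans ?_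
            have hval : r1.1 + r2.1 * 2 = r1.1 + 2 * r2.1 := by ring
            rw [hval]
            refine ((hrest2perm.cons _).trans ?_)
            rw [← List.append_assoc]
            exact (List.perm_append_singleton _ _).symm
          have hpushne : t.rest.rest.push (t.peek + t.rest.peek * 2) ≠ .nil := by
            intro hnil
            have := hpushperm.length_eq
            rw [hnil] at this
            simp only [PHeap.toList, List.length_nil] at this
            rw [hdropapp] at this
            simp at this
          have hpushsz : (t.rest.rest.push (t.peek + t.rest.peek * 2)).size ≤ fa := by
            rw [size_eq_length, hpushperm.length_eq, hdropapp]
            simp only [List.length_append, List.length_drop, List.length_singleton]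
            omega
          have hak' : ¬ r1.1 ≥ k := by omega
          rw [loopAF, if_pos hcA, loopBF, if_pos hbig]
          simp only [← hr1, if_neg hak', ← hr2]
          refine ih fb _ s (merged ++ [r1.1 + 2 * r2.1]) r2.2.1 r2.2.2 k (a + 1)
            hpushsz ?_ hi2 (by rw [List.length_append]; simpa using by omega) hpushne
            (isHeap_push hrest2heap _) hpushperm hs hm' h4' h5'
          rw [List.length_append]
          simp only [List.length_singleton]
          omega
      · -- exactly one element left: both sides test it against k
        have hone : (s.length - i) + (merged.length - j) = 1 := by omega
        have hcA : ¬ (1 < t.size ∧ t.peek < k) := by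
          rintro ⟨hgt, -⟩
          omega
        -- the single remaining element equals the heap's root
        have hlast : t.peek = (if i < s.length then s.getD i 0 else merged.getD j 0) := by
          split
          · rename_i hil
            have hj0 : merged.length - j = 0 ∧ s.length - i = 1 := by omega
            have hsd : s.drop i = [s[i]] := by
              have := List.drop_eq_getElem_cons hil
              rw [this, List.drop_eq_nil_of_le (by omega)]
            have hmdnil : merged.drop j = [] := List.drop_eq_nil_of_le (by omega)
            have hp : t.toList.Perm [s[i]] := by
              rw [hsd, hmdnil] at hperm
              simpa using hperm
            rw [List.getD_eq_getElem s 0 hil]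
            exact peek_eq_of_min hheap hne hp (by simp)
          · rename_i hil
            have hjlt : j < merged.length := by omega
            have hsdnil : s.drop i = [] := List.drop_eq_nil_of_le (by omega)
            have hmd : merged.drop j = [merged[j]] := by
              have := List.drop_eq_getElem_cons hjlt
              rw [this, List.drop_eq_nil_of_le (by omega)]
            have hp : t.toList.Perm [merged[j]] := by
              rw [hsdnil, hmd] at hperm
              simpa using hperm
            rw [List.getD_eq_getElem merged 0 hjlt]
            exact peek_eq_of_min hheap hne hp (by simp)
        have hnotbig : ¬ 1 < (s.length - i) + (merged.length - j) := hbig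
        rw [loopAF, if_neg hcA, loopBF, if_neg hnotbig]
        simp only [← hlast]

-- ===== VERDICT (by name: the statement is the Claim_ definition above) =====
theorem solution_spec : Claim_equal_solution := by
  intro scoville k _ hpre
  unfold Spec_solution solution solution_alt
  have hsperm : (PySem.List.sorted scoville (fun x => x) false).Perm scoville :=
    PySem.List.sorted_perm scoville (fun x => x) false
  refine loop_eq (PHeap.heapify scoville).size (scoville.length + 1) _ _ [] 0 0 k 0
    (le_refl _) ?_ (by omega) (by omega) ?_ (heapify_isHeap scoville .nil trivial) ?_ ?_
    (by simp) (by simp) (by simp)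
  · simp only [List.length_nil]; rw [hsperm.length_eq]; omega
  · intro hnil
    apply hpre
    have hp := heapify_perm scoville .nil
    rw [PHeap.heapify] at hnil
    rw [hnil] at hp
    simp only [PHeap.toList, List.nil_append] at hp
    exact hp.symm.eq_nil
  · refine (heapify_perm scoville .nil).trans ?_
    simpa [PHeap.toList] using hsperm.symm
  · simpa using PySem.List.sorted_pairwise scoville (fun x => x)
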